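-- pv_equiv track=rewrite | github.com/pypi-data/pypi-mirror-342 | packages/kcpp/kcpp-0.7-py3-none-any.whl/kcpp/unicode/name_to_cp.py | hangul_syllable_to_cp
-- ===== SOURCE A (Python) =====
-- HANGUL_LEADS = ['G', 'GG', 'N', 'D', 'DD', 'R', 'M', 'B', 'BB', 'S', 'SS', '', 'J', 'JJ', 'C',
--                 'K', 'T', 'P', 'H']
--
-- HANGUL_VOWELS = ['A', 'AE', 'YA', 'YAE', 'EO', 'E', 'YEO', 'YE', 'O', 'WA', 'WAE', 'OE', 'YO',
--                  'U', 'WEO', 'WE', 'WI', 'YU', 'EU', 'YI', 'I']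
--
-- HANGUL_TAILS = ['', 'G', 'GG', 'GS', 'N', 'NJ', 'NH', 'D', 'L', 'LG', 'LM', 'LB', 'LS', 'LT', 'LP',
--                 'LH', 'M', 'B', 'BS', 'S', 'SS', 'NG', 'J', 'C', 'K', 'T', 'P', 'H']
--
-- def hangul_syllable_to_cp(text):
--     def hangul_lead(text):
--         best = 11
--         for n, lead in enumerate(HANGUL_LEADS):
--             if text.startswith(lead) and len(lead) > len(HANGUL_LEADS[best]):
--                 best = n
--         return best
--
--     def hangul_vowel(text):
--         best = -1
--         for n, vowel in enumerate(HANGUL_VOWELS):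
--             if text.startswith(vowel) and (best == -1 or len(vowel) > len(HANGUL_VOWELS[best])):
--                 best = n
--         return best
--
--     def hangul_tail(text):
--         try:
--             return HANGUL_TAILS.index(text)
--         except ValueError:
--             return -1
--
--     lead = hangul_lead(text)
--     text = text[len(HANGUL_LEADS[lead]):]
--     vowel = hangul_vowel(text)
--     if vowel == -1:
--         return -1
--     text = text[len(HANGUL_VOWELS[vowel]):]
--     tail = hangul_tail(text)
--     if tail == -1:
--         return -1
--
--     return 0xAC00 + (lead * 21 + vowel) * 28 + tail
-- ===== SOURCE B (Python) =====
-- HANGUL_LEADS = ['G', 'GG', 'N', 'D', 'DD', 'R', 'M', 'B', 'BB', 'S', 'SS', '', 'J', 'JJ', 'C',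
--                 'K', 'T', 'P', 'H']
--
-- HANGUL_VOWELS = ['A', 'AE', 'YA', 'YAE', 'EO', 'E', 'YEO', 'YE', 'O', 'WA', 'WAE', 'OE', 'YO',
--                  'U', 'WEO', 'WE', 'WI', 'YU', 'EU', 'YI', 'I']
--
-- HANGUL_TAILS = ['', 'G', 'GG', 'GS', 'N', 'NJ', 'NH', 'D', 'L', 'LG', 'LM', 'LB', 'LS', 'LT', 'LP',
--                 'LH', 'M', 'B', 'BS', 'S', 'SS', 'NG', 'J', 'C', 'K', 'T', 'P', 'H']
--
-- # Reverse dicts built once: name -> index.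
-- LEAD_IDX = {lead: n for n, lead in enumerate(HANGUL_LEADS) if lead}
-- VOWEL_IDX = {vowel: n for n, vowel in enumerate(HANGUL_VOWELS)}
-- TAIL_IDX = {tail: n for n, tail in enumerate(HANGUL_TAILS)}
--
--
-- def _parse_lead(text):
--     # Probe the 2-char then the 1-char prefix; default: empty lead, index 11.
--     p = text[:2]
--     if p in LEAD_IDX:
--         return LEAD_IDX[p], text[len(p):]
--     p = text[:1]
--     if p in LEAD_IDX:
--         return LEAD_IDX[p], text[len(p):]
--     return 11, text
--
--
-- def _parse_vowel(text):
--     # Probe the 3-, 2-, then 1-char prefix; -1 if none is a vowel name.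
--     p = text[:3]
--     if p in VOWEL_IDX:
--         return VOWEL_IDX[p], text[len(p):]
--     p = text[:2]
--     if p in VOWEL_IDX:
--         return VOWEL_IDX[p], text[len(p):]
--     p = text[:1]
--     if p in VOWEL_IDX:
--         return VOWEL_IDX[p], text[len(p):]
--     return -1, text
--
--
-- def hangul_syllable_to_cp(text):
--     lead, text = _parse_lead(text)
--     vowel, text = _parse_vowel(text)
--     if vowel == -1:
--         return -1
--     tail = TAIL_IDX.get(text, -1)
--     if tail == -1:
--         return -1
--     return 0xAC00 + (lead * 21 + vowel) * 28 + tail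
-- ===== Notes on version B (the rewrite author's own statement) =====
-- stated objective: idiomatic
-- what changed: Replaces A's longest-match scans over every candidate lead/vowel name (and list.index for the tail) with precomputed name-to-index dicts probed at descending prefix lengths (2,1 for leads; 3,2,1 for vowels) and one exact dict lookup for the tail.
import Mathlib
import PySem

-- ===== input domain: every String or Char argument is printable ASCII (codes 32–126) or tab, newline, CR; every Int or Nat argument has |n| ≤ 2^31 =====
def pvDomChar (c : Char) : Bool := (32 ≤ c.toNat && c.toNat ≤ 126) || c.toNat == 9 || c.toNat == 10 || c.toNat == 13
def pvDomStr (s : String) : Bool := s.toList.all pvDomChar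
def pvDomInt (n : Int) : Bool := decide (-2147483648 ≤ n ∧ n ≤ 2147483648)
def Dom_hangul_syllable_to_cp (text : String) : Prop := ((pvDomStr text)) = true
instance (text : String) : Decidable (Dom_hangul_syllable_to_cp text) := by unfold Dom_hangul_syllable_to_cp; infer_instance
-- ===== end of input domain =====

-- B replaces A's longest-match scans over every candidate lead/vowel name (and list.index for
-- the tail) with precomputed name-to-index dicts probed at descending prefix lengths (idiomatic; same cost class).

-- ===== PORT A =====
def aLEADS : List String := ["G","GG","N","D","DD","R","M","B","BB","S","SS","","J","JJ","C","K","T","P","H"]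
def aVOWELS : List String := ["A","AE","YA","YAE","EO","E","YEO","YE","O","WA","WAE","OE","YO","U","WEO","WE","WI","YU","EU","YI","I"]
def aTAILS : List String := ["","G","GG","GS","N","NJ","NH","D","L","LG","LM","LB","LS","LT","LP","LH","M","B","BS","S","SS","NG","J","C","K","T","P","H"]

-- A's inner hangul_lead: scan all leads, keep the longest matching prefix (default 11, the empty lead)
def hangulLeadA (text : String) : Int :=
  (PySem.List.enumerate aLEADS).foldl
    (fun best p =>
      if PySem.Str.startswith text p.2 = true ∧
          PySem.Str.len p.2 > PySem.Str.len ((PySem.List.pyGet? aLEADS best).getD "")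
      then p.1 else best)
    11

-- A's inner hangul_vowel: scan all vowels, keep the longest matching prefix (default -1)
def hangulVowelA (text : String) : Int :=
  (PySem.List.enumerate aVOWELS).foldl
    (fun best p =>
      if PySem.Str.startswith text p.2 = true ∧
          (best = -1 ∨ PySem.Str.len p.2 > PySem.Str.len ((PySem.List.pyGet? aVOWELS best).getD ""))
      then p.1 else best)
    (-1)

-- A's inner hangul_tail: HANGUL_TAILS.index(text), -1 on ValueError
def hangulTailA (text : String) : Int :=
  match PySem.List.index? aTAILS text with
  | some k => (k : Int)
  | none => -1

def hangul_syllable_to_cp (text : String) : Int :=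
  let lead := hangulLeadA text
  let text1 := PySem.Str.slice text (some (PySem.Str.len ((PySem.List.pyGet? aLEADS lead).getD "") : Int)) none
  let vowel := hangulVowelA text1
  if vowel = -1 then -1
  else
    let text2 := PySem.Str.slice text1 (some (PySem.Str.len ((PySem.List.pyGet? aVOWELS vowel).getD "") : Int)) none
    let tail := hangulTailA text2
    if tail = -1 then -1
    else 0xAC00 + (lead * 21 + vowel) * 28 + tail

-- ===== PORT B =====
-- B's reverse dicts, name -> index (the empty lead is not a key; it is the default 11)
def bLeadIdx : PySem.Dict String Int := PySem.Dict.ofList [("G",(0:Int)),("GG",(1:Int)),("N",(2:Int)),("D",(3:Int)),("DD",(4:Int)),("R",(5:Int)),("M",(6:Int)),("B",(7:Int)),("BB",(8:Int)),("S",(9:Int)),("SS",(10:Int)),("J",(12:Int)),("JJ",(13:Int)),("C",(14:Int)),("K",(15:Int)),("T",(16:Int)),("P",(17:Int)),("H",(18:Int))]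
def bVowelIdx : PySem.Dict String Int := PySem.Dict.ofList [("A",(0:Int)),("AE",(1:Int)),("YA",(2:Int)),("YAE",(3:Int)),("EO",(4:Int)),("E",(5:Int)),("YEO",(6:Int)),("YE",(7:Int)),("O",(8:Int)),("WA",(9:Int)),("WAE",(10:Int)),("OE",(11:Int)),("YO",(12:Int)),("U",(13:Int)),("WEO",(14:Int)),("WE",(15:Int)),("WI",(16:Int)),("YU",(17:Int)),("EU",(18:Int)),("YI",(19:Int)),("I",(20:Int))]
def bTailIdx : PySem.Dict String Int := PySem.Dict.ofList [("",(0:Int)),("G",(1:Int)),("GG",(2:Int)),("GS",(3:Int)),("N",(4:Int)),("NJ",(5:Int)),("NH",(6:Int)),("D",(7:Int)),("L",(8:Int)),("LG",(9:Int)),("LM",(10:Int)),("LB",(11:Int)),("LS",(12:Int)),("LT",(13:Int)),("LP",(14:Int)),("LH",(15:Int)),("M",(16:Int)),("B",(17:Int)),("BS",(18:Int)),("S",(19:Int)),("SS",(20:Int)),("NG",(21:Int)),("J",(22:Int)),("C",(23:Int)),("K",(24:Int)),("T",(25:Int)),("P",(26:Int)),("H",(27:Int))]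

-- B's _parse_lead: probe the 2-char then the 1-char prefix in the dict; default (11, text)
def parseLead (text : String) : Int × String :=
  let p2 := PySem.Str.slice text none (some 2)
  match PySem.Dict.get? bLeadIdx p2 with
  | some n => (n, PySem.Str.slice text (some (PySem.Str.len p2 : Int)) none)
  | none =>
    let p1 := PySem.Str.slice text none (some 1)
    match PySem.Dict.get? bLeadIdx p1 with
    | some n => (n, PySem.Str.slice text (some (PySem.Str.len p1 : Int)) none)
    | none => (11, text)

-- B's _parse_vowel: probe the 3-, 2-, then 1-char prefix in the dict; default (-1, text)
def parseVowel (text : String) : Int × String :=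
  let p3 := PySem.Str.slice text none (some 3)
  match PySem.Dict.get? bVowelIdx p3 with
  | some n => (n, PySem.Str.slice text (some (PySem.Str.len p3 : Int)) none)
  | none =>
    let p2 := PySem.Str.slice text none (some 2)
    match PySem.Dict.get? bVowelIdx p2 with
    | some n => (n, PySem.Str.slice text (some (PySem.Str.len p2 : Int)) none)
    | none =>
      let p1 := PySem.Str.slice text none (some 1)
      match PySem.Dict.get? bVowelIdx p1 with
      | some n => (n, PySem.Str.slice text (some (PySem.Str.len p1 : Int)) none)
      | none => (-1, text)

def hangul_syllable_to_cp_alt (text : String) : Int :=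
  let lv := parseLead text
  let vv := parseVowel lv.2
  if vv.1 = -1 then -1
  else
    let tail := PySem.Dict.getD bTailIdx vv.2 (-1)
    if tail = -1 then -1
    else 0xAC00 + (lv.1 * 21 + vv.1) * 28 + tail

-- ===== PRECONDITION & SPEC =====
def Spec_hangul_syllable_to_cp (text : String) (out : Int) : Prop := out = hangul_syllable_to_cp_alt text
instance (text : String) (out : Int) : Decidable (Spec_hangul_syllable_to_cp text out) := by unfold Spec_hangul_syllable_to_cp; infer_instance

-- ===== CLAIM (what is proved, stated in full; the proofs are below) =====
def Claim_equal_hangul_syllable_to_cp : Prop := ∀ (text : String), Dom_hangul_syllable_to_cp text → Spec_hangul_syllable_to_cp text (hangul_syllable_to_cp text)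

-- ===== LEMMAS AND PROOFS =====

@[simp] theorem pvLit0_tl : ("G" : String).toList = ['G'] := rfl
@[simp] theorem pvLit0_sl : ("G" : String).length = 1 := rfl
@[simp] theorem pvLit1_tl : ("GG" : String).toList = ['G','G'] := rfl
@[simp] theorem pvLit1_sl : ("GG" : String).length = 2 := rfl
@[simp] theorem pvLit2_tl : ("N" : String).toList = ['N'] := rfl
@[simp] theorem pvLit2_sl : ("N" : String).length = 1 := rfl
@[simp] theorem pvLit3_tl : ("D" : String).toList = ['D'] := rfl
@[simp] theorem pvLit3_sl : ("D" : String).length = 1 := rfl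
@[simp] theorem pvLit4_tl : ("DD" : String).toList = ['D','D'] := rfl
@[simp] theorem pvLit4_sl : ("DD" : String).length = 2 := rfl
@[simp] theorem pvLit5_tl : ("R" : String).toList = ['R'] := rfl
@[simp] theorem pvLit5_sl : ("R" : String).length = 1 := rfl
@[simp] theorem pvLit6_tl : ("M" : String).toList = ['M'] := rfl
@[simp] theorem pvLit6_sl : ("M" : String).length = 1 := rfl
@[simp] theorem pvLit7_tl : ("B" : String).toList = ['B'] := rfl
@[simp] theorem pvLit7_sl : ("B" : String).length = 1 := rfl
@[simp] theorem pvLit8_tl : ("BB" : String).toList = ['B','B'] := rfl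
@[simp] theorem pvLit8_sl : ("BB" : String).length = 2 := rfl
@[simp] theorem pvLit9_tl : ("S" : String).toList = ['S'] := rfl
@[simp] theorem pvLit9_sl : ("S" : String).length = 1 := rfl
@[simp] theorem pvLit10_tl : ("SS" : String).toList = ['S','S'] := rfl
@[simp] theorem pvLit10_sl : ("SS" : String).length = 2 := rfl
@[simp] theorem pvLit11_tl : ("" : String).toList = [] := rfl
@[simp] theorem pvLit11_sl : ("" : String).length = 0 := rfl
@[simp] theorem pvLit12_tl : ("J" : String).toList = ['J'] := rfl
@[simp] theorem pvLit12_sl : ("J" : String).length = 1 := rfl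
@[simp] theorem pvLit13_tl : ("JJ" : String).toList = ['J','J'] := rfl
@[simp] theorem pvLit13_sl : ("JJ" : String).length = 2 := rfl
@[simp] theorem pvLit14_tl : ("C" : String).toList = ['C'] := rfl
@[simp] theorem pvLit14_sl : ("C" : String).length = 1 := rfl
@[simp] theorem pvLit15_tl : ("K" : String).toList = ['K'] := rfl
@[simp] theorem pvLit15_sl : ("K" : String).length = 1 := rfl
@[simp] theorem pvLit16_tl : ("T" : String).toList = ['T'] := rfl
@[simp] theorem pvLit16_sl : ("T" : String).length = 1 := rfl
@[simp] theorem pvLit17_tl : ("P" : String).toList = ['P'] := rfl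
@[simp] theorem pvLit17_sl : ("P" : String).length = 1 := rfl
@[simp] theorem pvLit18_tl : ("H" : String).toList = ['H'] := rfl
@[simp] theorem pvLit18_sl : ("H" : String).length = 1 := rfl
@[simp] theorem pvLit19_tl : ("A" : String).toList = ['A'] := rfl
@[simp] theorem pvLit19_sl : ("A" : String).length = 1 := rfl
@[simp] theorem pvLit20_tl : ("AE" : String).toList = ['A','E'] := rfl
@[simp] theorem pvLit20_sl : ("AE" : String).length = 2 := rfl
@[simp] theorem pvLit21_tl : ("YA" : String).toList = ['Y','A'] := rfl
@[simp] theorem pvLit21_sl : ("YA" : String).length = 2 := rfl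
@[simp] theorem pvLit22_tl : ("YAE" : String).toList = ['Y','A','E'] := rfl
@[simp] theorem pvLit22_sl : ("YAE" : String).length = 3 := rfl
@[simp] theorem pvLit23_tl : ("EO" : String).toList = ['E','O'] := rfl
@[simp] theorem pvLit23_sl : ("EO" : String).length = 2 := rfl
@[simp] theorem pvLit24_tl : ("E" : String).toList = ['E'] := rfl
@[simp] theorem pvLit24_sl : ("E" : String).length = 1 := rfl
@[simp] theorem pvLit25_tl : ("YEO" : String).toList = ['Y','E','O'] := rfl
@[simp] theorem pvLit25_sl : ("YEO" : String).length = 3 := rfl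
@[simp] theorem pvLit26_tl : ("YE" : String).toList = ['Y','E'] := rfl
@[simp] theorem pvLit26_sl : ("YE" : String).length = 2 := rfl
@[simp] theorem pvLit27_tl : ("O" : String).toList = ['O'] := rfl
@[simp] theorem pvLit27_sl : ("O" : String).length = 1 := rfl
@[simp] theorem pvLit28_tl : ("WA" : String).toList = ['W','A'] := rfl
@[simp] theorem pvLit28_sl : ("WA" : String).length = 2 := rfl
@[simp] theorem pvLit29_tl : ("WAE" : String).toList = ['W','A','E'] := rfl
@[simp] theorem pvLit29_sl : ("WAE" : String).length = 3 := rfl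
@[simp] theorem pvLit30_tl : ("OE" : String).toList = ['O','E'] := rfl
@[simp] theorem pvLit30_sl : ("OE" : String).length = 2 := rfl
@[simp] theorem pvLit31_tl : ("YO" : String).toList = ['Y','O'] := rfl
@[simp] theorem pvLit31_sl : ("YO" : String).length = 2 := rfl
@[simp] theorem pvLit32_tl : ("U" : String).toList = ['U'] := rfl
@[simp] theorem pvLit32_sl : ("U" : String).length = 1 := rfl
@[simp] theorem pvLit33_tl : ("WEO" : String).toList = ['W','E','O'] := rfl
@[simp] theorem pvLit33_sl : ("WEO" : String).length = 3 := rfl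
@[simp] theorem pvLit34_tl : ("WE" : String).toList = ['W','E'] := rfl
@[simp] theorem pvLit34_sl : ("WE" : String).length = 2 := rfl
@[simp] theorem pvLit35_tl : ("WI" : String).toList = ['W','I'] := rfl
@[simp] theorem pvLit35_sl : ("WI" : String).length = 2 := rfl
@[simp] theorem pvLit36_tl : ("YU" : String).toList = ['Y','U'] := rfl
@[simp] theorem pvLit36_sl : ("YU" : String).length = 2 := rfl
@[simp] theorem pvLit37_tl : ("EU" : String).toList = ['E','U'] := rfl
@[simp] theorem pvLit37_sl : ("EU" : String).length = 2 := rfl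
@[simp] theorem pvLit38_tl : ("YI" : String).toList = ['Y','I'] := rfl
@[simp] theorem pvLit38_sl : ("YI" : String).length = 2 := rfl
@[simp] theorem pvLit39_tl : ("I" : String).toList = ['I'] := rfl
@[simp] theorem pvLit39_sl : ("I" : String).length = 1 := rfl

@[simp] theorem pvOfList_eq (l : List Char) (s : String) : (String.ofList l = s) ↔ l = s.toList := by
  constructor
  · rintro rfl; simp
  · intro h; subst h; simp
@[simp] theorem pvEq_ofList (l : List Char) (s : String) : (s = String.ofList l) ↔ s.toList = l := by
  rw [eq_comm, pvOfList_eq, eq_comm]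
@[simp] theorem pvStrSlice (s : String) (a b : Option Int) :
    PySem.Str.slice s a b = String.ofList (PySem.List.slice s.toList a b) := by
  apply String.ext; simp

@[simp] theorem pvEnumL : PySem.List.enumerate aLEADS = [((0:Int),"G"),((1:Int),"GG"),((2:Int),"N"),((3:Int),"D"),((4:Int),"DD"),((5:Int),"R"),((6:Int),"M"),((7:Int),"B"),((8:Int),"BB"),((9:Int),"S"),((10:Int),"SS"),((11:Int),""),((12:Int),"J"),((13:Int),"JJ"),((14:Int),"C"),((15:Int),"K"),((16:Int),"T"),((17:Int),"P"),((18:Int),"H")] := by decide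
@[simp] theorem pvEnumV : PySem.List.enumerate aVOWELS = [((0:Int),"A"),((1:Int),"AE"),((2:Int),"YA"),((3:Int),"YAE"),((4:Int),"EO"),((5:Int),"E"),((6:Int),"YEO"),((7:Int),"YE"),((8:Int),"O"),((9:Int),"WA"),((10:Int),"WAE"),((11:Int),"OE"),((12:Int),"YO"),((13:Int),"U"),((14:Int),"WEO"),((15:Int),"WE"),((16:Int),"WI"),((17:Int),"YU"),((18:Int),"EU"),((19:Int),"YI"),((20:Int),"I")] := by decide
@[simp] theorem pvItemsL : bLeadIdx.items = [("G",(0:Int)),("GG",(1:Int)),("N",(2:Int)),("D",(3:Int)),("DD",(4:Int)),("R",(5:Int)),("M",(6:Int)),("B",(7:Int)),("BB",(8:Int)),("S",(9:Int)),("SS",(10:Int)),("J",(12:Int)),("JJ",(13:Int)),("C",(14:Int)),("K",(15:Int)),("T",(16:Int)),("P",(17:Int)),("H",(18:Int))] := by decide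
@[simp] theorem pvItemsV : bVowelIdx.items = [("A",(0:Int)),("AE",(1:Int)),("YA",(2:Int)),("YAE",(3:Int)),("EO",(4:Int)),("E",(5:Int)),("YEO",(6:Int)),("YE",(7:Int)),("O",(8:Int)),("WA",(9:Int)),("WAE",(10:Int)),("OE",(11:Int)),("YO",(12:Int)),("U",(13:Int)),("WEO",(14:Int)),("WE",(15:Int)),("WI",(16:Int)),("YU",(17:Int)),("EU",(18:Int)),("YI",(19:Int)),("I",(20:Int))] := by decide
@[simp] theorem pvItemsT : bTailIdx.items = [("",(0:Int)),("G",(1:Int)),("GG",(2:Int)),("GS",(3:Int)),("N",(4:Int)),("NJ",(5:Int)),("NH",(6:Int)),("D",(7:Int)),("L",(8:Int)),("LG",(9:Int)),("LM",(10:Int)),("LB",(11:Int)),("LS",(12:Int)),("LT",(13:Int)),("LP",(14:Int)),("LH",(15:Int)),("M",(16:Int)),("B",(17:Int)),("BS",(18:Int)),("S",(19:Int)),("SS",(20:Int)),("NG",(21:Int)),("J",(22:Int)),("C",(23:Int)),("K",(24:Int)),("T",(25:Int)),("P",(26:Int)),("H",(27:Int))] := by decide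
@[simp] theorem pg_aLEADS_0 : (PySem.List.pyGet? aLEADS (0 : Int)).getD "" = "G" := by decide
@[simp] theorem pg_aLEADS_1 : (PySem.List.pyGet? aLEADS (1 : Int)).getD "" = "GG" := by decide
@[simp] theorem pg_aLEADS_2 : (PySem.List.pyGet? aLEADS (2 : Int)).getD "" = "N" := by decide
@[simp] theorem pg_aLEADS_3 : (PySem.List.pyGet? aLEADS (3 : Int)).getD "" = "D" := by decide
@[simp] theorem pg_aLEADS_4 : (PySem.List.pyGet? aLEADS (4 : Int)).getD "" = "DD" := by decide
@[simp] theorem pg_aLEADS_5 : (PySem.List.pyGet? aLEADS (5 : Int)).getD "" = "R" := by decide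
@[simp] theorem pg_aLEADS_6 : (PySem.List.pyGet? aLEADS (6 : Int)).getD "" = "M" := by decide
@[simp] theorem pg_aLEADS_7 : (PySem.List.pyGet? aLEADS (7 : Int)).getD "" = "B" := by decide
@[simp] theorem pg_aLEADS_8 : (PySem.List.pyGet? aLEADS (8 : Int)).getD "" = "BB" := by decide
@[simp] theorem pg_aLEADS_9 : (PySem.List.pyGet? aLEADS (9 : Int)).getD "" = "S" := by decide
@[simp] theorem pg_aLEADS_10 : (PySem.List.pyGet? aLEADS (10 : Int)).getD "" = "SS" := by decide
@[simp] theorem pg_aLEADS_11 : (PySem.List.pyGet? aLEADS (11 : Int)).getD "" = "" := by decide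
@[simp] theorem pg_aLEADS_12 : (PySem.List.pyGet? aLEADS (12 : Int)).getD "" = "J" := by decide
@[simp] theorem pg_aLEADS_13 : (PySem.List.pyGet? aLEADS (13 : Int)).getD "" = "JJ" := by decide
@[simp] theorem pg_aLEADS_14 : (PySem.List.pyGet? aLEADS (14 : Int)).getD "" = "C" := by decide
@[simp] theorem pg_aLEADS_15 : (PySem.List.pyGet? aLEADS (15 : Int)).getD "" = "K" := by decide
@[simp] theorem pg_aLEADS_16 : (PySem.List.pyGet? aLEADS (16 : Int)).getD "" = "T" := by decide
@[simp] theorem pg_aLEADS_17 : (PySem.List.pyGet? aLEADS (17 : Int)).getD "" = "P" := by decide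
@[simp] theorem pg_aLEADS_18 : (PySem.List.pyGet? aLEADS (18 : Int)).getD "" = "H" := by decide
@[simp] theorem pg_aVOWELS_0 : (PySem.List.pyGet? aVOWELS (0 : Int)).getD "" = "A" := by decide
@[simp] theorem pg_aVOWELS_1 : (PySem.List.pyGet? aVOWELS (1 : Int)).getD "" = "AE" := by decide
@[simp] theorem pg_aVOWELS_2 : (PySem.List.pyGet? aVOWELS (2 : Int)).getD "" = "YA" := by decide
@[simp] theorem pg_aVOWELS_3 : (PySem.List.pyGet? aVOWELS (3 : Int)).getD "" = "YAE" := by decide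
@[simp] theorem pg_aVOWELS_4 : (PySem.List.pyGet? aVOWELS (4 : Int)).getD "" = "EO" := by decide
@[simp] theorem pg_aVOWELS_5 : (PySem.List.pyGet? aVOWELS (5 : Int)).getD "" = "E" := by decide
@[simp] theorem pg_aVOWELS_6 : (PySem.List.pyGet? aVOWELS (6 : Int)).getD "" = "YEO" := by decide
@[simp] theorem pg_aVOWELS_7 : (PySem.List.pyGet? aVOWELS (7 : Int)).getD "" = "YE" := by decide
@[simp] theorem pg_aVOWELS_8 : (PySem.List.pyGet? aVOWELS (8 : Int)).getD "" = "O" := by decide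
@[simp] theorem pg_aVOWELS_9 : (PySem.List.pyGet? aVOWELS (9 : Int)).getD "" = "WA" := by decide
@[simp] theorem pg_aVOWELS_10 : (PySem.List.pyGet? aVOWELS (10 : Int)).getD "" = "WAE" := by decide
@[simp] theorem pg_aVOWELS_11 : (PySem.List.pyGet? aVOWELS (11 : Int)).getD "" = "OE" := by decide
@[simp] theorem pg_aVOWELS_12 : (PySem.List.pyGet? aVOWELS (12 : Int)).getD "" = "YO" := by decide
@[simp] theorem pg_aVOWELS_13 : (PySem.List.pyGet? aVOWELS (13 : Int)).getD "" = "U" := by decide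
@[simp] theorem pg_aVOWELS_14 : (PySem.List.pyGet? aVOWELS (14 : Int)).getD "" = "WEO" := by decide
@[simp] theorem pg_aVOWELS_15 : (PySem.List.pyGet? aVOWELS (15 : Int)).getD "" = "WE" := by decide
@[simp] theorem pg_aVOWELS_16 : (PySem.List.pyGet? aVOWELS (16 : Int)).getD "" = "WI" := by decide
@[simp] theorem pg_aVOWELS_17 : (PySem.List.pyGet? aVOWELS (17 : Int)).getD "" = "YU" := by decide
@[simp] theorem pg_aVOWELS_18 : (PySem.List.pyGet? aVOWELS (18 : Int)).getD "" = "EU" := by decide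
@[simp] theorem pg_aVOWELS_19 : (PySem.List.pyGet? aVOWELS (19 : Int)).getD "" = "YI" := by decide
@[simp] theorem pg_aVOWELS_20 : (PySem.List.pyGet? aVOWELS (20 : Int)).getD "" = "I" := by decide
@[simp] theorem pg_aVOWELS_m1 : (PySem.List.pyGet? aVOWELS (-1 : Int)).getD "" = "I" := by decide
theorem tail_eq (t : String) : hangulTailA t = PySem.Dict.getD bTailIdx t (-1) := by
  by_cases h0 : t = ""
  · subst h0; decide
  by_cases h1 : t = "G"
  · subst h1; decide
  by_cases h2 : t = "GG"
  · subst h2; decide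
  by_cases h3 : t = "GS"
  · subst h3; decide
  by_cases h4 : t = "N"
  · subst h4; decide
  by_cases h5 : t = "NJ"
  · subst h5; decide
  by_cases h6 : t = "NH"
  · subst h6; decide
  by_cases h7 : t = "D"
  · subst h7; decide
  by_cases h8 : t = "L"
  · subst h8; decide
  by_cases h9 : t = "LG"
  · subst h9; decide
  by_cases h10 : t = "LM"
  · subst h10; decide
  by_cases h11 : t = "LB"
  · subst h11; decide
  by_cases h12 : t = "LS"
  · subst h12; decide
  by_cases h13 : t = "LT"
  · subst h13; decide
  by_cases h14 : t = "LP"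
  · subst h14; decide
  by_cases h15 : t = "LH"
  · subst h15; decide
  by_cases h16 : t = "M"
  · subst h16; decide
  by_cases h17 : t = "B"
  · subst h17; decide
  by_cases h18 : t = "BS"
  · subst h18; decide
  by_cases h19 : t = "S"
  · subst h19; decide
  by_cases h20 : t = "SS"
  · subst h20; decide
  by_cases h21 : t = "NG"
  · subst h21; decide
  by_cases h22 : t = "J"
  · subst h22; decide
  by_cases h23 : t = "C"
  · subst h23; decide
  by_cases h24 : t = "K"
  · subst h24; decide
  by_cases h25 : t = "T"
  · subst h25; decide
  by_cases h26 : t = "P"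
  · subst h26; decide
  by_cases h27 : t = "H"
  · subst h27; decide
  have hidx : List.idxOf? t aTAILS = none := List.idxOf?_eq_none_iff.mpr (by simp [aTAILS, h0, h1, h2, h3, h4, h5, h6, h7, h8, h9, h10, h11, h12, h13, h14, h15, h16, h17, h18, h19, h20, h21, h22, h23, h24, h25, h26, h27])
  simp [hangulTailA, hidx, PySem.Dict.getD, PySem.Dict.get?, Ne.symm h0, Ne.symm h1, Ne.symm h2, Ne.symm h3, Ne.symm h4, Ne.symm h5, Ne.symm h6, Ne.symm h7, Ne.symm h8, Ne.symm h9, Ne.symm h10, Ne.symm h11, Ne.symm h12, Ne.symm h13, Ne.symm h14, Ne.symm h15, Ne.symm h16, Ne.symm h17, Ne.symm h18, Ne.symm h19, Ne.symm h20, Ne.symm h21, Ne.symm h22, Ne.symm h23, Ne.symm h24, Ne.symm h25, Ne.symm h26, Ne.symm h27]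

def aStage2 (lead vowel : Int) (t : String) : Int :=
  let tail := hangulTailA t
  if tail = -1 then -1 else 0xAC00 + (lead * 21 + vowel) * 28 + tail
def bStage2 (lead vowel : Int) (t : String) : Int :=
  let tail := PySem.Dict.getD bTailIdx t (-1)
  if tail = -1 then -1 else 0xAC00 + (lead * 21 + vowel) * 28 + tail
theorem stage2_eq (lead vowel : Int) (t : String) : aStage2 lead vowel t = bStage2 lead vowel t := by
  simp only [aStage2, bStage2, tail_eq]
def aStage1 (lead : Int) (t : String) : Int :=
  let vowel := hangulVowelA t
  if vowel = -1 then -1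
  else aStage2 lead vowel (PySem.Str.slice t (some (PySem.Str.len ((PySem.List.pyGet? aVOWELS vowel).getD "") : Int)) none)
def bStage1 (lead : Int) (t : String) : Int :=
  let vv := parseVowel t
  if vv.1 = -1 then -1 else bStage2 lead vv.1 vv.2

set_option maxHeartbeats 1600000 in
theorem stage1_eq (lead : Int) (t : String) : aStage1 lead t = bStage1 lead t := by
  obtain ⟨l, rfl⟩ : ∃ l, t = String.ofList l := ⟨t.toList, by simp⟩
  rcases l with _ | ⟨c1, _ | ⟨c2, _ | ⟨c3, r⟩⟩⟩
  · simp [aStage1, bStage1, hangulVowelA, parseVowel, PySem.Dict.get?, PySem.Chars.startswith, List.isPrefixOf, PySem.List.slice_to, PySem.List.slice_from, stage2_eq]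
  · by_cases hh1 : c1 = 'A'
    · subst hh1
      simp [aStage1, bStage1, hangulVowelA, parseVowel, PySem.Dict.get?, PySem.Chars.startswith, List.isPrefixOf, PySem.List.slice_to, PySem.List.slice_from, stage2_eq]
    by_cases hh2 : c1 = 'E'
    · subst hh2
      simp [aStage1, bStage1, hangulVowelA, parseVowel, PySem.Dict.get?, PySem.Chars.startswith, List.isPrefixOf, PySem.List.slice_to, PySem.List.slice_from, stage2_eq, hh1, Ne.symm hh1]
    by_cases hh3 : c1 = 'Y'
    · subst hh3
      simp [aStage1, bStage1, hangulVowelA, parseVowel, PySem.Dict.get?, PySem.Chars.startswith, List.isPrefixOf, PySem.List.slice_to, PySem.List.slice_from, stage2_eq, hh1, Ne.symm hh1, hh2, Ne.symm hh2]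
    by_cases hh4 : c1 = 'O'
    · subst hh4
      simp [aStage1, bStage1, hangulVowelA, parseVowel, PySem.Dict.get?, PySem.Chars.startswith, List.isPrefixOf, PySem.List.slice_to, PySem.List.slice_from, stage2_eq, hh1, Ne.symm hh1, hh2, Ne.symm hh2, hh3, Ne.symm hh3]
    by_cases hh5 : c1 = 'W'
    · subst hh5
      simp [aStage1, bStage1, hangulVowelA, parseVowel, PySem.Dict.get?, PySem.Chars.startswith, List.isPrefixOf, PySem.List.slice_to, PySem.List.slice_from, stage2_eq, hh1, Ne.symm hh1, hh2, Ne.symm hh2, hh3, Ne.symm hh3, hh4, Ne.symm hh4]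
    by_cases hh6 : c1 = 'U'
    · subst hh6
      simp [aStage1, bStage1, hangulVowelA, parseVowel, PySem.Dict.get?, PySem.Chars.startswith, List.isPrefixOf, PySem.List.slice_to, PySem.List.slice_from, stage2_eq, hh1, Ne.symm hh1, hh2, Ne.symm hh2, hh3, Ne.symm hh3, hh4, Ne.symm hh4, hh5, Ne.symm hh5]
    by_cases hh7 : c1 = 'I'
    · subst hh7
      simp [aStage1, bStage1, hangulVowelA, parseVowel, PySem.Dict.get?, PySem.Chars.startswith, List.isPrefixOf, PySem.List.slice_to, PySem.List.slice_from, stage2_eq, hh1, Ne.symm hh1, hh2, Ne.symm hh2, hh3, Ne.symm hh3, hh4, Ne.symm hh4, hh5, Ne.symm hh5, hh6, Ne.symm hh6]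
    simp [aStage1, bStage1, hangulVowelA, parseVowel, PySem.Dict.get?, PySem.Chars.startswith, List.isPrefixOf, PySem.List.slice_to, PySem.List.slice_from, stage2_eq, hh1, Ne.symm hh1, hh2, Ne.symm hh2, hh3, Ne.symm hh3, hh4, Ne.symm hh4, hh5, Ne.symm hh5, hh6, Ne.symm hh6, hh7, Ne.symm hh7]
  · by_cases hh8 : c1 = 'A'
    · subst hh8
      by_cases hh9 : c2 = 'E'
      · subst hh9
        simp [aStage1, bStage1, hangulVowelA, parseVowel, PySem.Dict.get?, PySem.Chars.startswith, List.isPrefixOf, PySem.List.slice_to, PySem.List.slice_from, stage2_eq]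
      simp [aStage1, bStage1, hangulVowelA, parseVowel, PySem.Dict.get?, PySem.Chars.startswith, List.isPrefixOf, PySem.List.slice_to, PySem.List.slice_from, stage2_eq, hh9, Ne.symm hh9]
    by_cases hh10 : c1 = 'E'
    · subst hh10
      by_cases hh11 : c2 = 'O'
      · subst hh11
        simp [aStage1, bStage1, hangulVowelA, parseVowel, PySem.Dict.get?, PySem.Chars.startswith, List.isPrefixOf, PySem.List.slice_to, PySem.List.slice_from, stage2_eq, hh8, Ne.symm hh8]
      by_cases hh12 : c2 = 'U'
      · subst hh12
        simp [aStage1, bStage1, hangulVowelA, parseVowel, PySem.Dict.get?, PySem.Chars.startswith, List.isPrefixOf, PySem.List.slice_to, PySem.List.slice_from, stage2_eq, hh8, Ne.symm hh8, hh11, Ne.symm hh11]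
      simp [aStage1, bStage1, hangulVowelA, parseVowel, PySem.Dict.get?, PySem.Chars.startswith, List.isPrefixOf, PySem.List.slice_to, PySem.List.slice_from, stage2_eq, hh8, Ne.symm hh8, hh11, Ne.symm hh11, hh12, Ne.symm hh12]
    by_cases hh13 : c1 = 'Y'
    · subst hh13
      by_cases hh14 : c2 = 'A'
      · subst hh14
        simp [aStage1, bStage1, hangulVowelA, parseVowel, PySem.Dict.get?, PySem.Chars.startswith, List.isPrefixOf, PySem.List.slice_to, PySem.List.slice_from, stage2_eq, hh8, Ne.symm hh8, hh10, Ne.symm hh10]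
      by_cases hh15 : c2 = 'E'
      · subst hh15
        simp [aStage1, bStage1, hangulVowelA, parseVowel, PySem.Dict.get?, PySem.Chars.startswith, List.isPrefixOf, PySem.List.slice_to, PySem.List.slice_from, stage2_eq, hh8, Ne.symm hh8, hh10, Ne.symm hh10, hh14, Ne.symm hh14]
      by_cases hh16 : c2 = 'O'
      · subst hh16
        simp [aStage1, bStage1, hangulVowelA, parseVowel, PySem.Dict.get?, PySem.Chars.startswith, List.isPrefixOf, PySem.List.slice_to, PySem.List.slice_from, stage2_eq, hh8, Ne.symm hh8, hh10, Ne.symm hh10, hh14, Ne.symm hh14, hh15, Ne.symm hh15]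
      by_cases hh17 : c2 = 'U'
      · subst hh17
        simp [aStage1, bStage1, hangulVowelA, parseVowel, PySem.Dict.get?, PySem.Chars.startswith, List.isPrefixOf, PySem.List.slice_to, PySem.List.slice_from, stage2_eq, hh8, Ne.symm hh8, hh10, Ne.symm hh10, hh14, Ne.symm hh14, hh15, Ne.symm hh15, hh16, Ne.symm hh16]
      by_cases hh18 : c2 = 'I'
      · subst hh18
        simp [aStage1, bStage1, hangulVowelA, parseVowel, PySem.Dict.get?, PySem.Chars.startswith, List.isPrefixOf, PySem.List.slice_to, PySem.List.slice_from, stage2_eq, hh8, Ne.symm hh8, hh10, Ne.symm hh10, hh14, Ne.symm hh14, hh15, Ne.symm hh15, hh16, Ne.symm hh16, hh17, Ne.symm hh17]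
      simp [aStage1, bStage1, hangulVowelA, parseVowel, PySem.Dict.get?, PySem.Chars.startswith, List.isPrefixOf, PySem.List.slice_to, PySem.List.slice_from, stage2_eq, hh8, Ne.symm hh8, hh10, Ne.symm hh10, hh14, Ne.symm hh14, hh15, Ne.symm hh15, hh16, Ne.symm hh16, hh17, Ne.symm hh17, hh18, Ne.symm hh18]
    by_cases hh19 : c1 = 'O'
    · subst hh19
      by_cases hh20 : c2 = 'E'
      · subst hh20
        simp [aStage1, bStage1, hangulVowelA, parseVowel, PySem.Dict.get?, PySem.Chars.startswith, List.isPrefixOf, PySem.List.slice_to, PySem.List.slice_from, stage2_eq, hh8, Ne.symm hh8, hh10, Ne.symm hh10, hh13, Ne.symm hh13]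
      simp [aStage1, bStage1, hangulVowelA, parseVowel, PySem.Dict.get?, PySem.Chars.startswith, List.isPrefixOf, PySem.List.slice_to, PySem.List.slice_from, stage2_eq, hh8, Ne.symm hh8, hh10, Ne.symm hh10, hh13, Ne.symm hh13, hh20, Ne.symm hh20]
    by_cases hh21 : c1 = 'W'
    · subst hh21
      by_cases hh22 : c2 = 'A'
      · subst hh22
        simp [aStage1, bStage1, hangulVowelA, parseVowel, PySem.Dict.get?, PySem.Chars.startswith, List.isPrefixOf, PySem.List.slice_to, PySem.List.slice_from, stage2_eq, hh8, Ne.symm hh8, hh10, Ne.symm hh10, hh13, Ne.symm hh13, hh19, Ne.symm hh19]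
      by_cases hh23 : c2 = 'E'
      · subst hh23
        simp [aStage1, bStage1, hangulVowelA, parseVowel, PySem.Dict.get?, PySem.Chars.startswith, List.isPrefixOf, PySem.List.slice_to, PySem.List.slice_from, stage2_eq, hh8, Ne.symm hh8, hh10, Ne.symm hh10, hh13, Ne.symm hh13, hh19, Ne.symm hh19, hh22, Ne.symm hh22]
      by_cases hh24 : c2 = 'I'
      · subst hh24
        simp [aStage1, bStage1, hangulVowelA, parseVowel, PySem.Dict.get?, PySem.Chars.startswith, List.isPrefixOf, PySem.List.slice_to, PySem.List.slice_from, stage2_eq, hh8, Ne.symm hh8, hh10, Ne.symm hh10, hh13, Ne.symm hh13, hh19, Ne.symm hh19, hh22, Ne.symm hh22, hh23, Ne.symm hh23]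
      simp [aStage1, bStage1, hangulVowelA, parseVowel, PySem.Dict.get?, PySem.Chars.startswith, List.isPrefixOf, PySem.List.slice_to, PySem.List.slice_from, stage2_eq, hh8, Ne.symm hh8, hh10, Ne.symm hh10, hh13, Ne.symm hh13, hh19, Ne.symm hh19, hh22, Ne.symm hh22, hh23, Ne.symm hh23, hh24, Ne.symm hh24]
    by_cases hh25 : c1 = 'U'
    · subst hh25
      simp [aStage1, bStage1, hangulVowelA, parseVowel, PySem.Dict.get?, PySem.Chars.startswith, List.isPrefixOf, PySem.List.slice_to, PySem.List.slice_from, stage2_eq, hh8, Ne.symm hh8, hh10, Ne.symm hh10, hh13, Ne.symm hh13, hh19, Ne.symm hh19, hh21, Ne.symm hh21]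
    by_cases hh26 : c1 = 'I'
    · subst hh26
      simp [aStage1, bStage1, hangulVowelA, parseVowel, PySem.Dict.get?, PySem.Chars.startswith, List.isPrefixOf, PySem.List.slice_to, PySem.List.slice_from, stage2_eq, hh8, Ne.symm hh8, hh10, Ne.symm hh10, hh13, Ne.symm hh13, hh19, Ne.symm hh19, hh21, Ne.symm hh21, hh25, Ne.symm hh25]
    simp [aStage1, bStage1, hangulVowelA, parseVowel, PySem.Dict.get?, PySem.Chars.startswith, List.isPrefixOf, PySem.List.slice_to, PySem.List.slice_from, stage2_eq, hh8, Ne.symm hh8, hh10, Ne.symm hh10, hh13, Ne.symm hh13, hh19, Ne.symm hh19, hh21, Ne.symm hh21, hh25, Ne.symm hh25, hh26, Ne.symm hh26]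
  · by_cases hh27 : c1 = 'A'
    · subst hh27
      by_cases hh28 : c2 = 'E'
      · subst hh28
        simp [aStage1, bStage1, hangulVowelA, parseVowel, PySem.Dict.get?, PySem.Chars.startswith, List.isPrefixOf, PySem.List.slice_to, PySem.List.slice_from, stage2_eq]
      simp [aStage1, bStage1, hangulVowelA, parseVowel, PySem.Dict.get?, PySem.Chars.startswith, List.isPrefixOf, PySem.List.slice_to, PySem.List.slice_from, stage2_eq, hh28, Ne.symm hh28]
    by_cases hh29 : c1 = 'E'
    · subst hh29
      by_cases hh30 : c2 = 'O'
      · subst hh30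
        simp [aStage1, bStage1, hangulVowelA, parseVowel, PySem.Dict.get?, PySem.Chars.startswith, List.isPrefixOf, PySem.List.slice_to, PySem.List.slice_from, stage2_eq, hh27, Ne.symm hh27]
      by_cases hh31 : c2 = 'U'
      · subst hh31
        simp [aStage1, bStage1, hangulVowelA, parseVowel, PySem.Dict.get?, PySem.Chars.startswith, List.isPrefixOf, PySem.List.slice_to, PySem.List.slice_from, stage2_eq, hh27, Ne.symm hh27, hh30, Ne.symm hh30]
      simp [aStage1, bStage1, hangulVowelA, parseVowel, PySem.Dict.get?, PySem.Chars.startswith, List.isPrefixOf, PySem.List.slice_to, PySem.List.slice_from, stage2_eq, hh27, Ne.symm hh27, hh30, Ne.symm hh30, hh31, Ne.symm hh31]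
    by_cases hh32 : c1 = 'Y'
    · subst hh32
      by_cases hh33 : c2 = 'A'
      · subst hh33
        by_cases hh34 : c3 = 'E'
        · subst hh34
          simp [aStage1, bStage1, hangulVowelA, parseVowel, PySem.Dict.get?, PySem.Chars.startswith, List.isPrefixOf, PySem.List.slice_to, PySem.List.slice_from, stage2_eq, hh27, Ne.symm hh27, hh29, Ne.symm hh29]
        simp [aStage1, bStage1, hangulVowelA, parseVowel, PySem.Dict.get?, PySem.Chars.startswith, List.isPrefixOf, PySem.List.slice_to, PySem.List.slice_from, stage2_eq, hh27, Ne.symm hh27, hh29, Ne.symm hh29, hh34, Ne.symm hh34]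
      by_cases hh35 : c2 = 'E'
      · subst hh35
        by_cases hh36 : c3 = 'O'
        · subst hh36
          simp [aStage1, bStage1, hangulVowelA, parseVowel, PySem.Dict.get?, PySem.Chars.startswith, List.isPrefixOf, PySem.List.slice_to, PySem.List.slice_from, stage2_eq, hh27, Ne.symm hh27, hh29, Ne.symm hh29, hh33, Ne.symm hh33]
        simp [aStage1, bStage1, hangulVowelA, parseVowel, PySem.Dict.get?, PySem.Chars.startswith, List.isPrefixOf, PySem.List.slice_to, PySem.List.slice_from, stage2_eq, hh27, Ne.symm hh27, hh29, Ne.symm hh29, hh33, Ne.symm hh33, hh36, Ne.symm hh36]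
      by_cases hh37 : c2 = 'O'
      · subst hh37
        simp [aStage1, bStage1, hangulVowelA, parseVowel, PySem.Dict.get?, PySem.Chars.startswith, List.isPrefixOf, PySem.List.slice_to, PySem.List.slice_from, stage2_eq, hh27, Ne.symm hh27, hh29, Ne.symm hh29, hh33, Ne.symm hh33, hh35, Ne.symm hh35]
      by_cases hh38 : c2 = 'U'
      · subst hh38
        simp [aStage1, bStage1, hangulVowelA, parseVowel, PySem.Dict.get?, PySem.Chars.startswith, List.isPrefixOf, PySem.List.slice_to, PySem.List.slice_from, stage2_eq, hh27, Ne.symm hh27, hh29, Ne.symm hh29, hh33, Ne.symm hh33, hh35, Ne.symm hh35, hh37, Ne.symm hh37]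
      by_cases hh39 : c2 = 'I'
      · subst hh39
        simp [aStage1, bStage1, hangulVowelA, parseVowel, PySem.Dict.get?, PySem.Chars.startswith, List.isPrefixOf, PySem.List.slice_to, PySem.List.slice_from, stage2_eq, hh27, Ne.symm hh27, hh29, Ne.symm hh29, hh33, Ne.symm hh33, hh35, Ne.symm hh35, hh37, Ne.symm hh37, hh38, Ne.symm hh38]
      simp [aStage1, bStage1, hangulVowelA, parseVowel, PySem.Dict.get?, PySem.Chars.startswith, List.isPrefixOf, PySem.List.slice_to, PySem.List.slice_from, stage2_eq, hh27, Ne.symm hh27, hh29, Ne.symm hh29, hh33, Ne.symm hh33, hh35, Ne.symm hh35, hh37, Ne.symm hh37, hh38, Ne.symm hh38, hh39, Ne.symm hh39]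
    by_cases hh40 : c1 = 'O'
    · subst hh40
      by_cases hh41 : c2 = 'E'
      · subst hh41
        simp [aStage1, bStage1, hangulVowelA, parseVowel, PySem.Dict.get?, PySem.Chars.startswith, List.isPrefixOf, PySem.List.slice_to, PySem.List.slice_from, stage2_eq, hh27, Ne.symm hh27, hh29, Ne.symm hh29, hh32, Ne.symm hh32]
      simp [aStage1, bStage1, hangulVowelA, parseVowel, PySem.Dict.get?, PySem.Chars.startswith, List.isPrefixOf, PySem.List.slice_to, PySem.List.slice_from, stage2_eq, hh27, Ne.symm hh27, hh29, Ne.symm hh29, hh32, Ne.symm hh32, hh41, Ne.symm hh41]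
    by_cases hh42 : c1 = 'W'
    · subst hh42
      by_cases hh43 : c2 = 'A'
      · subst hh43
        by_cases hh44 : c3 = 'E'
        · subst hh44
          simp [aStage1, bStage1, hangulVowelA, parseVowel, PySem.Dict.get?, PySem.Chars.startswith, List.isPrefixOf, PySem.List.slice_to, PySem.List.slice_from, stage2_eq, hh27, Ne.symm hh27, hh29, Ne.symm hh29, hh32, Ne.symm hh32, hh40, Ne.symm hh40]
        simp [aStage1, bStage1, hangulVowelA, parseVowel, PySem.Dict.get?, PySem.Chars.startswith, List.isPrefixOf, PySem.List.slice_to, PySem.List.slice_from, stage2_eq, hh27, Ne.symm hh27, hh29, Ne.symm hh29, hh32, Ne.symm hh32, hh40, Ne.symm hh40, hh44, Ne.symm hh44]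
      by_cases hh45 : c2 = 'E'
      · subst hh45
        by_cases hh46 : c3 = 'O'
        · subst hh46
          simp [aStage1, bStage1, hangulVowelA, parseVowel, PySem.Dict.get?, PySem.Chars.startswith, List.isPrefixOf, PySem.List.slice_to, PySem.List.slice_from, stage2_eq, hh27, Ne.symm hh27, hh29, Ne.symm hh29, hh32, Ne.symm hh32, hh40, Ne.symm hh40, hh43, Ne.symm hh43]
        simp [aStage1, bStage1, hangulVowelA, parseVowel, PySem.Dict.get?, PySem.Chars.startswith, List.isPrefixOf, PySem.List.slice_to, PySem.List.slice_from, stage2_eq, hh27, Ne.symm hh27, hh29, Ne.symm hh29, hh32, Ne.symm hh32, hh40, Ne.symm hh40, hh43, Ne.symm hh43, hh46, Ne.symm hh46]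
      by_cases hh47 : c2 = 'I'
      · subst hh47
        simp [aStage1, bStage1, hangulVowelA, parseVowel, PySem.Dict.get?, PySem.Chars.startswith, List.isPrefixOf, PySem.List.slice_to, PySem.List.slice_from, stage2_eq, hh27, Ne.symm hh27, hh29, Ne.symm hh29, hh32, Ne.symm hh32, hh40, Ne.symm hh40, hh43, Ne.symm hh43, hh45, Ne.symm hh45]
      simp [aStage1, bStage1, hangulVowelA, parseVowel, PySem.Dict.get?, PySem.Chars.startswith, List.isPrefixOf, PySem.List.slice_to, PySem.List.slice_from, stage2_eq, hh27, Ne.symm hh27, hh29, Ne.symm hh29, hh32, Ne.symm hh32, hh40, Ne.symm hh40, hh43, Ne.symm hh43, hh45, Ne.symm hh45, hh47, Ne.symm hh47]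
    by_cases hh48 : c1 = 'U'
    · subst hh48
      simp [aStage1, bStage1, hangulVowelA, parseVowel, PySem.Dict.get?, PySem.Chars.startswith, List.isPrefixOf, PySem.List.slice_to, PySem.List.slice_from, stage2_eq, hh27, Ne.symm hh27, hh29, Ne.symm hh29, hh32, Ne.symm hh32, hh40, Ne.symm hh40, hh42, Ne.symm hh42]
    by_cases hh49 : c1 = 'I'
    · subst hh49
      simp [aStage1, bStage1, hangulVowelA, parseVowel, PySem.Dict.get?, PySem.Chars.startswith, List.isPrefixOf, PySem.List.slice_to, PySem.List.slice_from, stage2_eq, hh27, Ne.symm hh27, hh29, Ne.symm hh29, hh32, Ne.symm hh32, hh40, Ne.symm hh40, hh42, Ne.symm hh42, hh48, Ne.symm hh48]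
    simp [aStage1, bStage1, hangulVowelA, parseVowel, PySem.Dict.get?, PySem.Chars.startswith, List.isPrefixOf, PySem.List.slice_to, PySem.List.slice_from, stage2_eq, hh27, Ne.symm hh27, hh29, Ne.symm hh29, hh32, Ne.symm hh32, hh40, Ne.symm hh40, hh42, Ne.symm hh42, hh48, Ne.symm hh48, hh49, Ne.symm hh49]
set_option maxHeartbeats 1600000 in
theorem top_eq (t : String) : hangul_syllable_to_cp t = hangul_syllable_to_cp_alt t := by
  show aStage1 (hangulLeadA t) (PySem.Str.slice t (some (PySem.Str.len ((PySem.List.pyGet? aLEADS (hangulLeadA t)).getD "") : Int)) none) = bStage1 (parseLead t).1 (parseLead t).2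
  obtain ⟨l, rfl⟩ : ∃ l, t = String.ofList l := ⟨t.toList, by simp⟩
  rcases l with _ | ⟨c1, _ | ⟨c2, r⟩⟩
  · simp [hangulLeadA, parseLead, PySem.Dict.get?, PySem.Chars.startswith, List.isPrefixOf, PySem.List.slice_to, PySem.List.slice_from, stage1_eq]
  · by_cases hh50 : c1 = 'G'
    · subst hh50
      simp [hangulLeadA, parseLead, PySem.Dict.get?, PySem.Chars.startswith, List.isPrefixOf, PySem.List.slice_to, PySem.List.slice_from, stage1_eq]
    by_cases hh51 : c1 = 'N'
    · subst hh51
      simp [hangulLeadA, parseLead, PySem.Dict.get?, PySem.Chars.startswith, List.isPrefixOf, PySem.List.slice_to, PySem.List.slice_from, stage1_eq, hh50, Ne.symm hh50]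
    by_cases hh52 : c1 = 'D'
    · subst hh52
      simp [hangulLeadA, parseLead, PySem.Dict.get?, PySem.Chars.startswith, List.isPrefixOf, PySem.List.slice_to, PySem.List.slice_from, stage1_eq, hh50, Ne.symm hh50, hh51, Ne.symm hh51]
    by_cases hh53 : c1 = 'R'
    · subst hh53
      simp [hangulLeadA, parseLead, PySem.Dict.get?, PySem.Chars.startswith, List.isPrefixOf, PySem.List.slice_to, PySem.List.slice_from, stage1_eq, hh50, Ne.symm hh50, hh51, Ne.symm hh51, hh52, Ne.symm hh52]
    by_cases hh54 : c1 = 'M'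
    · subst hh54
      simp [hangulLeadA, parseLead, PySem.Dict.get?, PySem.Chars.startswith, List.isPrefixOf, PySem.List.slice_to, PySem.List.slice_from, stage1_eq, hh50, Ne.symm hh50, hh51, Ne.symm hh51, hh52, Ne.symm hh52, hh53, Ne.symm hh53]
    by_cases hh55 : c1 = 'B'
    · subst hh55
      simp [hangulLeadA, parseLead, PySem.Dict.get?, PySem.Chars.startswith, List.isPrefixOf, PySem.List.slice_to, PySem.List.slice_from, stage1_eq, hh50, Ne.symm hh50, hh51, Ne.symm hh51, hh52, Ne.symm hh52, hh53, Ne.symm hh53, hh54, Ne.symm hh54]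
    by_cases hh56 : c1 = 'S'
    · subst hh56
      simp [hangulLeadA, parseLead, PySem.Dict.get?, PySem.Chars.startswith, List.isPrefixOf, PySem.List.slice_to, PySem.List.slice_from, stage1_eq, hh50, Ne.symm hh50, hh51, Ne.symm hh51, hh52, Ne.symm hh52, hh53, Ne.symm hh53, hh54, Ne.symm hh54, hh55, Ne.symm hh55]
    by_cases hh57 : c1 = 'J'
    · subst hh57
      simp [hangulLeadA, parseLead, PySem.Dict.get?, PySem.Chars.startswith, List.isPrefixOf, PySem.List.slice_to, PySem.List.slice_from, stage1_eq, hh50, Ne.symm hh50, hh51, Ne.symm hh51, hh52, Ne.symm hh52, hh53, Ne.symm hh53, hh54, Ne.symm hh54, hh55, Ne.symm hh55, hh56, Ne.symm hh56]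
    by_cases hh58 : c1 = 'C'
    · subst hh58
      simp [hangulLeadA, parseLead, PySem.Dict.get?, PySem.Chars.startswith, List.isPrefixOf, PySem.List.slice_to, PySem.List.slice_from, stage1_eq, hh50, Ne.symm hh50, hh51, Ne.symm hh51, hh52, Ne.symm hh52, hh53, Ne.symm hh53, hh54, Ne.symm hh54, hh55, Ne.symm hh55, hh56, Ne.symm hh56, hh57, Ne.symm hh57]
    by_cases hh59 : c1 = 'K'
    · subst hh59
      simp [hangulLeadA, parseLead, PySem.Dict.get?, PySem.Chars.startswith, List.isPrefixOf, PySem.List.slice_to, PySem.List.slice_from, stage1_eq, hh50, Ne.symm hh50, hh51, Ne.symm hh51, hh52, Ne.symm hh52, hh53, Ne.symm hh53, hh54, Ne.symm hh54, hh55, Ne.symm hh55, hh56, Ne.symm hh56, hh57, Ne.symm hh57, hh58, Ne.symm hh58]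
    by_cases hh60 : c1 = 'T'
    · subst hh60
      simp [hangulLeadA, parseLead, PySem.Dict.get?, PySem.Chars.startswith, List.isPrefixOf, PySem.List.slice_to, PySem.List.slice_from, stage1_eq, hh50, Ne.symm hh50, hh51, Ne.symm hh51, hh52, Ne.symm hh52, hh53, Ne.symm hh53, hh54, Ne.symm hh54, hh55, Ne.symm hh55, hh56, Ne.symm hh56, hh57, Ne.symm hh57, hh58, Ne.symm hh58, hh59, Ne.symm hh59]
    by_cases hh61 : c1 = 'P'
    · subst hh61
      simp [hangulLeadA, parseLead, PySem.Dict.get?, PySem.Chars.startswith, List.isPrefixOf, PySem.List.slice_to, PySem.List.slice_from, stage1_eq, hh50, Ne.symm hh50, hh51, Ne.symm hh51, hh52, Ne.symm hh52, hh53, Ne.symm hh53, hh54, Ne.symm hh54, hh55, Ne.symm hh55, hh56, Ne.symm hh56, hh57, Ne.symm hh57, hh58, Ne.symm hh58, hh59, Ne.symm hh59, hh60, Ne.symm hh60]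
    by_cases hh62 : c1 = 'H'
    · subst hh62
      simp [hangulLeadA, parseLead, PySem.Dict.get?, PySem.Chars.startswith, List.isPrefixOf, PySem.List.slice_to, PySem.List.slice_from, stage1_eq, hh50, Ne.symm hh50, hh51, Ne.symm hh51, hh52, Ne.symm hh52, hh53, Ne.symm hh53, hh54, Ne.symm hh54, hh55, Ne.symm hh55, hh56, Ne.symm hh56, hh57, Ne.symm hh57, hh58, Ne.symm hh58, hh59, Ne.symm hh59, hh60, Ne.symm hh60, hh61, Ne.symm hh61]
    simp [hangulLeadA, parseLead, PySem.Dict.get?, PySem.Chars.startswith, List.isPrefixOf, PySem.List.slice_to, PySem.List.slice_from, stage1_eq, hh50, Ne.symm hh50, hh51, Ne.symm hh51, hh52, Ne.symm hh52, hh53, Ne.symm hh53, hh54, Ne.symm hh54, hh55, Ne.symm hh55, hh56, Ne.symm hh56, hh57, Ne.symm hh57, hh58, Ne.symm hh58, hh59, Ne.symm hh59, hh60, Ne.symm hh60, hh61, Ne.symm hh61, hh62, Ne.symm hh62]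
  · by_cases hh63 : c1 = 'G'
    · subst hh63
      by_cases hh64 : c2 = 'G'
      · subst hh64
        simp [hangulLeadA, parseLead, PySem.Dict.get?, PySem.Chars.startswith, List.isPrefixOf, PySem.List.slice_to, PySem.List.slice_from, stage1_eq]
      simp [hangulLeadA, parseLead, PySem.Dict.get?, PySem.Chars.startswith, List.isPrefixOf, PySem.List.slice_to, PySem.List.slice_from, stage1_eq, hh64, Ne.symm hh64]
    by_cases hh65 : c1 = 'D'
    · subst hh65
      by_cases hh66 : c2 = 'D'
      · subst hh66
        simp [hangulLeadA, parseLead, PySem.Dict.get?, PySem.Chars.startswith, List.isPrefixOf, PySem.List.slice_to, PySem.List.slice_from, stage1_eq, hh63, Ne.symm hh63]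
      simp [hangulLeadA, parseLead, PySem.Dict.get?, PySem.Chars.startswith, List.isPrefixOf, PySem.List.slice_to, PySem.List.slice_from, stage1_eq, hh63, Ne.symm hh63, hh66, Ne.symm hh66]
    by_cases hh67 : c1 = 'B'
    · subst hh67
      by_cases hh68 : c2 = 'B'
      · subst hh68
        simp [hangulLeadA, parseLead, PySem.Dict.get?, PySem.Chars.startswith, List.isPrefixOf, PySem.List.slice_to, PySem.List.slice_from, stage1_eq, hh63, Ne.symm hh63, hh65, Ne.symm hh65]
      simp [hangulLeadA, parseLead, PySem.Dict.get?, PySem.Chars.startswith, List.isPrefixOf, PySem.List.slice_to, PySem.List.slice_from, stage1_eq, hh63, Ne.symm hh63, hh65, Ne.symm hh65, hh68, Ne.symm hh68]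
    by_cases hh69 : c1 = 'S'
    · subst hh69
      by_cases hh70 : c2 = 'S'
      · subst hh70
        simp [hangulLeadA, parseLead, PySem.Dict.get?, PySem.Chars.startswith, List.isPrefixOf, PySem.List.slice_to, PySem.List.slice_from, stage1_eq, hh63, Ne.symm hh63, hh65, Ne.symm hh65, hh67, Ne.symm hh67]
      simp [hangulLeadA, parseLead, PySem.Dict.get?, PySem.Chars.startswith, List.isPrefixOf, PySem.List.slice_to, PySem.List.slice_from, stage1_eq, hh63, Ne.symm hh63, hh65, Ne.symm hh65, hh67, Ne.symm hh67, hh70, Ne.symm hh70]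
    by_cases hh71 : c1 = 'J'
    · subst hh71
      by_cases hh72 : c2 = 'J'
      · subst hh72
        simp [hangulLeadA, parseLead, PySem.Dict.get?, PySem.Chars.startswith, List.isPrefixOf, PySem.List.slice_to, PySem.List.slice_from, stage1_eq, hh63, Ne.symm hh63, hh65, Ne.symm hh65, hh67, Ne.symm hh67, hh69, Ne.symm hh69]
      simp [hangulLeadA, parseLead, PySem.Dict.get?, PySem.Chars.startswith, List.isPrefixOf, PySem.List.slice_to, PySem.List.slice_from, stage1_eq, hh63, Ne.symm hh63, hh65, Ne.symm hh65, hh67, Ne.symm hh67, hh69, Ne.symm hh69, hh72, Ne.symm hh72]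
    by_cases hh73 : c1 = 'N'
    · subst hh73
      simp [hangulLeadA, parseLead, PySem.Dict.get?, PySem.Chars.startswith, List.isPrefixOf, PySem.List.slice_to, PySem.List.slice_from, stage1_eq, hh63, Ne.symm hh63, hh65, Ne.symm hh65, hh67, Ne.symm hh67, hh69, Ne.symm hh69, hh71, Ne.symm hh71]
    by_cases hh74 : c1 = 'R'
    · subst hh74
      simp [hangulLeadA, parseLead, PySem.Dict.get?, PySem.Chars.startswith, List.isPrefixOf, PySem.List.slice_to, PySem.List.slice_from, stage1_eq, hh63, Ne.symm hh63, hh65, Ne.symm hh65, hh67, Ne.symm hh67, hh69, Ne.symm hh69, hh71, Ne.symm hh71, hh73, Ne.symm hh73]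
    by_cases hh75 : c1 = 'M'
    · subst hh75
      simp [hangulLeadA, parseLead, PySem.Dict.get?, PySem.Chars.startswith, List.isPrefixOf, PySem.List.slice_to, PySem.List.slice_from, stage1_eq, hh63, Ne.symm hh63, hh65, Ne.symm hh65, hh67, Ne.symm hh67, hh69, Ne.symm hh69, hh71, Ne.symm hh71, hh73, Ne.symm hh73, hh74, Ne.symm hh74]
    by_cases hh76 : c1 = 'C'
    · subst hh76
      simp [hangulLeadA, parseLead, PySem.Dict.get?, PySem.Chars.startswith, List.isPrefixOf, PySem.List.slice_to, PySem.List.slice_from, stage1_eq, hh63, Ne.symm hh63, hh65, Ne.symm hh65, hh67, Ne.symm hh67, hh69, Ne.symm hh69, hh71, Ne.symm hh71, hh73, Ne.symm hh73, hh74, Ne.symm hh74, hh75, Ne.symm hh75]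
    by_cases hh77 : c1 = 'K'
    · subst hh77
      simp [hangulLeadA, parseLead, PySem.Dict.get?, PySem.Chars.startswith, List.isPrefixOf, PySem.List.slice_to, PySem.List.slice_from, stage1_eq, hh63, Ne.symm hh63, hh65, Ne.symm hh65, hh67, Ne.symm hh67, hh69, Ne.symm hh69, hh71, Ne.symm hh71, hh73, Ne.symm hh73, hh74, Ne.symm hh74, hh75, Ne.symm hh75, hh76, Ne.symm hh76]
    by_cases hh78 : c1 = 'T'
    · subst hh78
      simp [hangulLeadA, parseLead, PySem.Dict.get?, PySem.Chars.startswith, List.isPrefixOf, PySem.List.slice_to, PySem.List.slice_from, stage1_eq, hh63, Ne.symm hh63, hh65, Ne.symm hh65, hh67, Ne.symm hh67, hh69, Ne.symm hh69, hh71, Ne.symm hh71, hh73, Ne.symm hh73, hh74, Ne.symm hh74, hh75, Ne.symm hh75, hh76, Ne.symm hh76, hh77, Ne.symm hh77]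
    by_cases hh79 : c1 = 'P'
    · subst hh79
      simp [hangulLeadA, parseLead, PySem.Dict.get?, PySem.Chars.startswith, List.isPrefixOf, PySem.List.slice_to, PySem.List.slice_from, stage1_eq, hh63, Ne.symm hh63, hh65, Ne.symm hh65, hh67, Ne.symm hh67, hh69, Ne.symm hh69, hh71, Ne.symm hh71, hh73, Ne.symm hh73, hh74, Ne.symm hh74, hh75, Ne.symm hh75, hh76, Ne.symm hh76, hh77, Ne.symm hh77, hh78, Ne.symm hh78]
    by_cases hh80 : c1 = 'H'
    · subst hh80
      simp [hangulLeadA, parseLead, PySem.Dict.get?, PySem.Chars.startswith, List.isPrefixOf, PySem.List.slice_to, PySem.List.slice_from, stage1_eq, hh63, Ne.symm hh63, hh65, Ne.symm hh65, hh67, Ne.symm hh67, hh69, Ne.symm hh69, hh71, Ne.symm hh71, hh73, Ne.symm hh73, hh74, Ne.symm hh74, hh75, Ne.symm hh75, hh76, Ne.symm hh76, hh77, Ne.symm hh77, hh78, Ne.symm hh78, hh79, Ne.symm hh79]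
    simp [hangulLeadA, parseLead, PySem.Dict.get?, PySem.Chars.startswith, List.isPrefixOf, PySem.List.slice_to, PySem.List.slice_from, stage1_eq, hh63, Ne.symm hh63, hh65, Ne.symm hh65, hh67, Ne.symm hh67, hh69, Ne.symm hh69, hh71, Ne.symm hh71, hh73, Ne.symm hh73, hh74, Ne.symm hh74, hh75, Ne.symm hh75, hh76, Ne.symm hh76, hh77, Ne.symm hh77, hh78, Ne.symm hh78, hh79, Ne.symm hh79, hh80, Ne.symm hh80]

-- ===== VERDICT (by name: the statement is the Claim_ definition above) =====
theorem hangul_syllable_to_cp_spec : Claim_equal_hangul_syllable_to_cp := by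
  intro text _
  unfold Spec_hangul_syllable_to_cp
  exact top_eq text
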